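-- pv_equiv track=rewrite | github.com/ALATeacher/HSCTF | 3manynumbers.py | base3
-- ===== SOURCE A (Python) =====
-- def base3(num):
--     s = str(num)
--     l = len(s)
--     n = 0
--     total = 0
--     while n<l:
--         mult = pow(3,(l-n-1))
--         total+=mult*int(s[n])
--         n+=1
--     return total
-- ===== SOURCE B (Python) =====
-- def base3(num):
--     total = 0
--     for ch in str(num):
--         total = total * 3 + int(ch)
--     return total
-- ===== Notes on version B (the rewrite author's own statement) =====
-- stated objective: simpler
-- what changed: Replaces the indexed while-loop that recomputes pow(3, l-n-1) for every digit with a single Horner-style accumulator (total = total*3 + digit) over the characters of str(num).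
import Mathlib
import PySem

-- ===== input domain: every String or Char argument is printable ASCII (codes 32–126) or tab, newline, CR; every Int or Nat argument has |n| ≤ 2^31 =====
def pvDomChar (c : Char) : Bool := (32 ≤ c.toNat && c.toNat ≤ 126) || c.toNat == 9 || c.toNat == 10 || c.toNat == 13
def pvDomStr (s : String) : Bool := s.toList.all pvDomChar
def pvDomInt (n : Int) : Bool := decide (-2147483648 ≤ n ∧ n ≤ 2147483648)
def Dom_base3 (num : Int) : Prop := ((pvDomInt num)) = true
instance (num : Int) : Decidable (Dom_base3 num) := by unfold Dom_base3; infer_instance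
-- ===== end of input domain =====

-- B replaces A's per-digit pow(3, l-n-1) indexed loop by a Horner accumulator; objective: simpler.

-- ===== PORT A =====
-- while n < l: total += pow(3, l-n-1) * int(s[n]); n += 1  — a fold over range(0, l).
-- int(s[n]) is PySem.Int.ofChars? of the one-char string; its `.getD 0` arm is unreachable
-- under Pre_base3 (0 ≤ num, so every character of str(num) is a digit).
-- pow(3, l-n-1): the exponent is ≥ 0 for every n in range(0, l), so `.toNat` is exact there.
def base3 (num : Int) : Int :=
  let s := PySem.Int.toChars num
  let l : Int := s.length
  (PySem.List.pyRange 0 l).foldl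
    (fun total n =>
      let mult : Int := 3 ^ (l - n - 1).toNat
      total + mult * (PySem.Int.ofChars? [PySem.List.pyGetD s n ' ']).getD 0)
    0

-- ===== PORT B =====
-- Horner: total = total*3 + int(ch) over the characters of str(num).
def base3_alt (num : Int) : Int :=
  (PySem.Int.toChars num).foldl
    (fun total c => total * 3 + (PySem.Int.ofChars? [c]).getD 0) 0

-- ===== PRECONDITION & SPEC =====
-- Pre_ excludes num < 0, on which Python A raises ValueError (int('-') on the sign character).
def Pre_base3 (num : Int) : Prop := 0 ≤ num
instance (num : Int) : Decidable (Pre_base3 num) := by unfold Pre_base3; infer_instance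

def pvWitness_base3 : Int := 42

def Spec_base3 (num : Int) (out : Int) : Prop := out = base3_alt num
instance (num : Int) (out : Int) : Decidable (Spec_base3 num out) := by unfold Spec_base3; infer_instance

-- ===== CLAIM (what is proved, stated in full; the proofs are below) =====
def Claim_equal_base3 : Prop := ∀ (num : Int), Dom_base3 num → Pre_base3 num → Spec_base3 num (base3 num)

-- ===== LEMMAS AND PROOFS =====

-- Horner fold from an arbitrary accumulator.
theorem horner_gen (f : Char → Int) (ds : List Char) (t0 : Int) :
    ds.foldl (fun t c => t * 3 + f c) t0
      = t0 * 3 ^ ds.length + ds.foldl (fun t c => t * 3 + f c) 0 := by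
  induction ds generalizing t0 with
  | nil => simp
  | cons c t ih =>
      simp only [List.foldl_cons, List.length_cons]
      rw [ih (t0 * 3 + f c), ih (0 * 3 + f c)]
      ring

-- The positional sum A computes equals the Horner fold B computes, for any digit valuation f.
theorem sum_eq_horner (f : Char → Int) (ds : List Char) :
    ((List.range ds.length).map
        (fun k => 3 ^ (ds.length - 1 - k) * f (ds.getD k ' '))).sum
      = ds.foldl (fun t c => t * 3 + f c) 0 := by
  induction ds with
  | nil => simp
  | cons c t ih =>
      rw [List.length_cons, List.range_succ_eq_map, List.map_cons, List.map_map, List.sum_cons]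
      have hmap : ∀ k, ((fun k => 3 ^ (t.length + 1 - 1 - k) * f ((c :: t).getD k ' ')) ∘
          (fun i => i + 1)) k = 3 ^ (t.length - 1 - k) * f (t.getD k ' ') := by
        intro k
        simp only [Function.comp]
        congr 2
        omega
      rw [List.map_congr_left (fun k _ => hmap k), ih, List.foldl_cons,
          horner_gen f t (0 * 3 + f c)]
      simp
      ring

-- A's indexed fold with powers equals B's Horner fold, over any character list.
theorem fold_pow_eq_horner (f : Char → Int) (ds : List Char) :
    (PySem.List.pyRange 0 (ds.length : Int)).foldl
        (fun total n => total + 3 ^ (((ds.length : Int)) - n - 1).toNat * f (PySem.List.pyGetD ds n ' '))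
        0
      = ds.foldl (fun t c => t * 3 + f c) 0 := by
  rw [PySem.List.pyRange_zero_nat, List.foldl_map, PySem.List.foldl_add, zero_add,
      ← sum_eq_horner f ds]
  congr 1
  apply List.map_congr_left
  intro k hk
  rw [List.mem_range] at hk
  rw [PySem.List.pyGetD_natCast]
  congr 2
  omega

-- ===== VERDICT (by name: the statement is the Claim_ definition above) =====
theorem base3_spec : Claim_equal_base3 := by
  intro num _ _
  unfold Spec_base3
  show base3 num = base3_alt num
  simp only [base3, base3_alt]
  exact fold_pow_eq_horner (fun c => (PySem.Int.ofChars? [c]).getD 0) (PySem.Int.toChars num)
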